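-- pv_equiv track=rewrite | github.com/MathProuv/Advent-of-Code | y2021/2021-day16.py | get_reste
-- ===== SOURCE A (Python) =====
-- def get_reste(input):
--     input += '0'
--     res = ''
--     for c in input:
--         ccc = bin(int(c,16))[2:]
--         while len(ccc) < 4: ccc = '0' + ccc
--         res += ccc
--     return res
-- ===== SOURCE B (Python) =====
-- def get_reste(input):
--     input += '0'
--     return bin(int(input, 16))[2:].zfill(4 * len(input))
-- ===== Notes on version B (the rewrite author's own statement) =====
-- stated objective: simpler
-- what changed: B replaces A's per-character loop (convert each hex digit, pad with a while loop, accumulate by quadratic string concatenation) with one closed-form conversion: parse the whole string once with int(input,16), render with bin()[2:], and restore leading zeros with a single zfill(4*len(input)).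
import Mathlib
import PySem

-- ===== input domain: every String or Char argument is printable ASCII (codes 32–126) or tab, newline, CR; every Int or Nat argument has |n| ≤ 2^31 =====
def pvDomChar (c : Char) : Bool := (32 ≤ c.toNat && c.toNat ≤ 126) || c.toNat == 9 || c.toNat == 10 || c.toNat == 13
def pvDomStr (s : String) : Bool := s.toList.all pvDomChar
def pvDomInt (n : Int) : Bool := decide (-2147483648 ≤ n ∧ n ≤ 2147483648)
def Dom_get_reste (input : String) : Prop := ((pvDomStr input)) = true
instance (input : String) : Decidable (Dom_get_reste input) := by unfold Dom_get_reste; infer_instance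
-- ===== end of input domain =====

-- B replaces A's per-character convert-pad-concatenate loop by one closed-form
-- conversion: int(input,16) once, bin()[2:], then a single zfill.

-- shared numeric helpers (hand ports of Python builtins; each states where it is exact)

-- int(c, 16) for a single character: some value < 16 on a hex digit, none = ValueError
def pvHexVal? (c : Char) : Option Nat :=
  if 48 ≤ c.toNat ∧ c.toNat ≤ 57 then some (c.toNat - 48)
  else if 97 ≤ c.toNat ∧ c.toNat ≤ 102 then some (c.toNat - 87)
  else if 65 ≤ c.toNat ∧ c.toNat ≤ 70 then some (c.toNat - 55)
  else none

-- bin(n)[2:] for n ≥ 0, exact: binary digits of n, no leading zeros ("0" for 0).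
-- Fuel-structured recursion; fuel = n suffices since the argument halves each step.
def pvBinGo : Nat → Nat → List Char
  | _, 0 => []
  | 0, _ => []
  | (f+1), n => pvBinGo f (n / 2) ++ [if n % 2 = 1 then '1' else '0']

def pvBin (n : Nat) : List Char := if n = 0 then ['0'] else pvBinGo n n

-- ===== PORT A =====
-- "while len(ccc) < 4: ccc = '0' + ccc"; fuel 4 suffices: each step grows the list
def pvPadGo : Nat → List Char → List Char
  | 0, l => l
  | (f+1), l => if l.length < 4 then pvPadGo f ('0' :: l) else l

def pvPad4 (l : List Char) : List Char := pvPadGo 4 l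

-- literal port of A: append '0', then for each char convert and pad, accumulating res.
-- (pvHexVal? c).getD 0 is unreachable garbage: Python raises ValueError there (outside Pre_).
def get_reste (input : String) : String :=
  let s := input ++ "0"
  String.ofList (s.toList.foldl (fun res c => res ++ pvPad4 (pvBin ((pvHexVal? c).getD 0))) [])

-- ===== PORT B =====
-- int(s, 16): exact on nonempty strings of hex digits (what Pre_ admits; '0' is appended first)
def pvHexFold? (cs : List Char) : Option Nat :=
  cs.foldl (fun acc c =>
    match acc, pvHexVal? c with
    | some a, some v => some (16 * a + v)
    | _, _ => none) (some 0)

-- literal port of B: append '0', one whole-string int(...,16), bin()[2:], one zfill.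
def get_reste_alt (input : String) : String :=
  let s := input ++ "0"
  match pvHexFold? s.toList with
  | none => ""   -- ValueError in Python; outside Pre_
  | some n => String.ofList (PySem.Chars.zfill (pvBin n) (4 * (s.toList.length : Int)))

-- ===== PRECONDITION & SPEC =====
-- Pre_: every character is a hex digit — exactly the inputs where Python A returns
-- (on any other character int(c, 16) raises ValueError).
def Pre_get_reste (input : String) : Prop :=
  (input.toList.all (fun c => (pvHexVal? c).isSome)) = true
instance (input : String) : Decidable (Pre_get_reste input) := by unfold Pre_get_reste; infer_instance

def pvWitness_get_reste : String := "1aF0"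

def Spec_get_reste (input : String) (out : String) : Prop := out = get_reste_alt input
instance (input : String) (out : String) : Decidable (Spec_get_reste input out) := by unfold Spec_get_reste; infer_instance

-- ===== CLAIM (what is proved, stated in full; the proofs are below) =====
def Claim_equal_get_reste : Prop := ∀ (input : String), Dom_get_reste input → Pre_get_reste input → Spec_get_reste input (get_reste input)

-- ===== LEMMAS AND PROOFS =====

-- fixed-width big-endian binary representation (proof-side normal form)
def toBits : Nat → Nat → List Char
  | 0, _ => []
  | (m+1), n => toBits m (n / 2) ++ [if n % 2 = 1 then '1' else '0']

theorem toBits_zero : ∀ m, toBits m 0 = List.replicate m '0' := by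
  intro m; induction m with
  | zero => rfl
  | succ m ih =>
    show toBits m (0 / 2) ++ _ = _
    rw [Nat.zero_div, ih]
    simp [List.replicate_succ' (n := m)]

theorem pvBinGo_zfill : ∀ m f n, n < 2 ^ m → n ≤ f →
    List.replicate (m - (pvBinGo f n).length) '0' ++ pvBinGo f n = toBits m n := by
  intro m
  induction m with
  | zero =>
    intro f n h _
    interval_cases n
    cases f <;> simp [pvBinGo, toBits]
  | succ m ih =>
    intro f n h hf
    match n, f with
    | 0, f => cases f <;> simp [pvBinGo, toBits_zero]
    | (n+1), (f+1) =>
      show List.replicate _ '0' ++ (pvBinGo f ((n+1)/2) ++ _) = toBits m ((n+1)/2) ++ _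
      rw [← List.append_assoc]
      have h2 : (n+1)/2 < 2 ^ m := by
        have := Nat.pow_succ 2 m ▸ h; omega
      have hf2 : (n+1)/2 ≤ f := by omega
      rw [← ih _ _ h2 hf2]
      have hlen : (pvBinGo (f+1) (n+1)).length = (pvBinGo f ((n+1)/2)).length + 1 := by
        show (pvBinGo f ((n+1)/2) ++ [_]).length = _
        simp
      congr 2
      rw [hlen, Nat.succ_sub_succ]

theorem pvBinGo_head : ∀ f n, 0 < n → n ≤ f → (pvBinGo f n).head? = some '1' := by
  intro f
  induction f with
  | zero => intro n h hf; omega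
  | succ f ih =>
    intro n h hf
    match n with
    | (n+1) =>
      show (pvBinGo f ((n+1)/2) ++ _).head? = _
      by_cases hz : (n+1)/2 = 0
      · have : n = 0 := by omega
        subst this
        simp [hz, pvBinGo]
      · have := ih ((n+1)/2) (by omega) (by omega)
        rw [List.head?_append_of_ne_nil]
        · exact this
        · intro hnil; rw [hnil] at this; simp at this

-- zfill on a list not starting with a sign is a plain left pad
theorem zfill_eq (c : Char) (rest : List Char) (m : Nat) (hc : ¬(c = '+' ∨ c = '-')) :
    PySem.Chars.zfill (c :: rest) ((m : Nat) : Int)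
      = List.replicate (m - (c :: rest).length) '0' ++ c :: rest := by
  unfold PySem.Chars.zfill
  split
  · rename_i hle
    have hz : m - (c :: rest).length = 0 := by
      simp only [List.length_cons] at hle ⊢
      omega
    rw [hz]
    simp
  · rename_i hgt
    simp [hc]

-- zfill of pvBin gives exactly the fixed-width representation
theorem zfill_pvBin (m n : Nat) (hm : 0 < m) (h : n < 2 ^ m) :
    PySem.Chars.zfill (pvBin n) ((m : Nat) : Int) = toBits m n := by
  by_cases hn : n = 0
  · subst hn
    rw [show pvBin 0 = ['0'] from rfl, zfill_eq '0' [] m (by decide), toBits_zero]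
    match m, hm with
    | (m+1), _ =>
      rw [List.replicate_succ' (n := m)]
      simp
  · have hgo := pvBinGo_zfill m n n h (le_refl n)
    have hhead := pvBinGo_head n n (Nat.pos_of_ne_zero hn) (le_refl n)
    simp only [pvBin, if_neg hn]
    obtain ⟨c, rest, hcons⟩ : ∃ c rest, pvBinGo n n = c :: rest := by
      cases hg : pvBinGo n n with
      | nil => rw [hg] at hhead; simp at hhead
      | cons c rest => exact ⟨c, rest, rfl⟩
    have hc : c = '1' := by rw [hcons] at hhead; simpa using hhead
    subst hc
    rw [hcons] at hgo ⊢
    rw [zfill_eq '1' rest m (by decide), hgo]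

-- each hex digit's value is < 16
theorem pvHexVal?_lt (c : Char) (v : Nat) (h : pvHexVal? c = some v) : v < 16 := by
  unfold pvHexVal? at h
  split_ifs at h <;> simp_all <;> omega

-- A's per-digit chunk is the 4-bit representation
theorem chunk_eq : ∀ v < 16, pvPad4 (pvBin v) = toBits 4 v := by decide

-- the 4-bit chunks of the digits assemble the fixed-width representation of the folded value
theorem foldl_bound : ∀ (cs : List Char) (m a : Nat), a < 2 ^ m →
    (∀ c ∈ cs, ∃ v, pvHexVal? c = some v) →
    cs.foldl (fun a c => 16 * a + (pvHexVal? c).getD 0) a < 2 ^ (m + 4 * cs.length) := by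
  intro cs
  induction cs with
  | nil => intro m a h _; simpa using h
  | cons c cs ih =>
    intro m a h hhex
    obtain ⟨v, hv⟩ := hhex c (by simp)
    have hv16 := pvHexVal?_lt c v hv
    have step : 16 * a + (pvHexVal? c).getD 0 < 2 ^ (m + 4) := by
      rw [hv]
      have : 2 ^ (m + 4) = 16 * 2 ^ m := by ring
      simp only [Option.getD_some]; omega
    have := ih (m + 4) _ step (fun c hc => hhex c (by simp [hc]))
    simpa [List.foldl_cons, show m + 4 + 4 * cs.length = m + 4 * (c :: cs).length by simp; ring] using this

theorem toBits_step (m a v : Nat) (hv : v < 16) :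
    toBits (m + 4) (16 * a + v) = toBits m a ++ toBits 4 v := by
  simp only [toBits,
    show (16 * a + v) / 2 / 2 / 2 / 2 = a by omega,
    show (16 * a + v) / 2 / 2 / 2 % 2 = v / 2 / 2 / 2 % 2 by omega,
    show (16 * a + v) / 2 / 2 % 2 = v / 2 / 2 % 2 by omega,
    show (16 * a + v) / 2 % 2 = v / 2 % 2 by omega,
    show (16 * a + v) % 2 = v % 2 by omega]
  simp [List.append_assoc]

theorem assemble : ∀ (cs : List Char) (m a : Nat), a < 2 ^ m →
    (∀ c ∈ cs, ∃ v, pvHexVal? c = some v) →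
    toBits (m + 4 * cs.length) (cs.foldl (fun a c => 16 * a + (pvHexVal? c).getD 0) a)
      = toBits m a ++ cs.flatMap (fun c => toBits 4 ((pvHexVal? c).getD 0)) := by
  intro cs
  induction cs with
  | nil => intro m a _ _; simp
  | cons c cs ih =>
    intro m a h hhex
    obtain ⟨v, hv⟩ := hhex c (by simp)
    have hv16 := pvHexVal?_lt c v hv
    have step : 16 * a + (pvHexVal? c).getD 0 < 2 ^ (m + 4) := by
      rw [hv]
      have : 2 ^ (m + 4) = 16 * 2 ^ m := by ring
      simp only [Option.getD_some]; omega
    have hrec := ih (m + 4) _ step (fun c hc => hhex c (by simp [hc]))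
    have harith : m + 4 * (c :: cs).length = (m + 4) + 4 * cs.length := by simp; ring
    rw [List.foldl_cons, harith, hrec]
    rw [hv] at step ⊢
    simp only [Option.getD_some] at step ⊢
    rw [toBits_step m a v hv16]
    simp [List.flatMap_cons, hv]

-- under Pre_, pvHexFold? computes the plain fold of the digit values
theorem hexFold?_eq : ∀ (cs : List Char) (a : Nat),
    (∀ c ∈ cs, ∃ v, pvHexVal? c = some v) →
    cs.foldl (fun acc c =>
      match acc, pvHexVal? c with
      | some a, some v => some (16 * a + v)
      | _, _ => none) (some a)
      = some (cs.foldl (fun a c => 16 * a + (pvHexVal? c).getD 0) a) := by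
  intro cs
  induction cs with
  | nil => intro a _; rfl
  | cons c cs ih =>
    intro a hhex
    obtain ⟨v, hv⟩ := hhex c (by simp)
    simp only [List.foldl_cons, hv]
    rw [ih _ (fun c hc => hhex c (by simp [hc]))]
    simp

-- ===== VERDICT (by name: the statement is the Claim_ definition above) =====
theorem get_reste_spec : Claim_equal_get_reste := by
  intro input _ hpre
  unfold Spec_get_reste get_reste get_reste_alt
  dsimp only
  set cs := (input ++ "0").toList with hcs
  have hcs' : cs = input.toList ++ ['0'] := by
    simp [hcs, String.toList_append]
  have hhex : ∀ c ∈ cs, ∃ v, pvHexVal? c = some v := by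
    intro c hc
    rw [hcs', List.mem_append] at hc
    rcases hc with hc | hc
    · unfold Pre_get_reste at hpre
      rw [List.all_eq_true] at hpre
      have := hpre c hc
      exact Option.isSome_iff_exists.mp this
    · simp at hc; subst hc; exact ⟨0, by decide⟩
  have hlen : 0 < cs.length := by rw [hcs']; simp
  -- B side: resolve pvHexFold?
  unfold pvHexFold?
  rw [hexFold?_eq cs 0 hhex]
  set N := cs.foldl (fun a c => 16 * a + (pvHexVal? c).getD 0) 0 with hN
  -- A side: the foldl is a flatMap of 4-bit chunks
  rw [PySem.List.foldl_append_eq_flatMap]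
  simp only [List.nil_append]
  have hchunks : cs.flatMap (fun c => pvPad4 (pvBin ((pvHexVal? c).getD 0)))
      = cs.flatMap (fun c => toBits 4 ((pvHexVal? c).getD 0)) := by
    apply List.flatMap_congr
    intro c hc
    obtain ⟨v, hv⟩ := hhex c hc
    rw [hv]
    exact chunk_eq v (pvHexVal?_lt c v hv)
  rw [hchunks]
  -- connect via the fixed-width representation
  have hbound := foldl_bound cs 0 0 (by norm_num) hhex
  have hasm := assemble cs 0 0 (by norm_num) hhex
  simp only [Nat.zero_add] at hbound hasm
  rw [show toBits 0 0 = [] from rfl, List.nil_append] at hasm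
  rw [← hasm, ← hN] at *
  have hz := zfill_pvBin (4 * cs.length) N (by omega) hbound
  rw [show (4 * (cs.length : Int)) = ((4 * cs.length : Nat) : Int) by push_cast; ring, hz]
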